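-- pv_equiv track=rewrite | github.com/hut-ce/computer-networks | Projects/400130193/05/soal2/server.py | stalins_sort
-- ===== SOURCE A (Python) =====
-- def stalins_sort(arr):
--     sorted_arr = [arr[0]]
--     deleted_numbers = []
--     for num in arr[1:]:
--         if num >= sorted_arr[-1]:
--             sorted_arr.append(num)
--         else:
--             deleted_numbers.append(num)
--     return sorted_arr, deleted_numbers
-- ===== SOURCE B (Python) =====
-- def stalins_sort(arr):
--     # one pass to build the prefix-maximum table, then classify:
--     # element is kept iff it equals its inclusive prefix maximum
--     prefix = []
--     m = arr[0]
--     for x in arr: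
--         m = m if m > x else x
--         prefix.append(m)
--     kept = [x for x, p in zip(arr, prefix) if x == p]
--     deleted = [x for x, p in zip(arr, prefix) if x != p]
--     return kept, deleted
-- ===== Notes on version B (the rewrite author's own statement) =====
-- stated objective: alternative
-- what changed: Replaces the single stateful keep/delete loop over the tail with a two-pass decomposition: build the inclusive prefix-maximum table, then classify each element as kept iff it equals its prefix maximum.
import Mathlib
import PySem

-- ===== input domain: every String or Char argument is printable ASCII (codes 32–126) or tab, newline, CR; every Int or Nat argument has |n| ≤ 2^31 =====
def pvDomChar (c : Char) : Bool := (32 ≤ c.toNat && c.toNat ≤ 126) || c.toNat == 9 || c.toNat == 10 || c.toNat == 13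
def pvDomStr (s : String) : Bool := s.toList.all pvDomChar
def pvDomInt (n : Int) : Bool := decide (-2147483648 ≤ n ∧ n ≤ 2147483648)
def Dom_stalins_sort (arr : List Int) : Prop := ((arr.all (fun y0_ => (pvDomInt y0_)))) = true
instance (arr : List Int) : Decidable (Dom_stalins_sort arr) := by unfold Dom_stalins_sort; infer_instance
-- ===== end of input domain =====

-- B replaces A's stateful keep/delete loop by a two-pass decomposition:
-- a prefix-maximum table, then classification (kept iff element = prefix max). Same O(n) cost.


-- ===== PORT A =====
-- the loop over arr[1:] carrying (sorted_arr, deleted_numbers); sorted_arr is never empty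
def stalinsLoopA : List Int → List Int → List Int → List Int × List Int
  | [], s, d => (s, d)
  | num :: rest, s, d =>
    if num ≥ s.getLastD 0 then stalinsLoopA rest (s ++ [num]) d
    else stalinsLoopA rest s (d ++ [num])

def stalins_sort (arr : List Int) : List Int × List Int :=
  match arr with
  | [] => ([], [])   -- unreachable: arr[0] raises IndexError, excluded by Pre_
  | a :: rest => stalinsLoopA rest [a] []

-- ===== PORT B =====
-- first pass: inclusive prefix-maximum table seeded with arr[0]
def prefMax : List Int → Int → List Int
  | [], _ => []
  | x :: rest, m => let m' := if m > x then m else x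
                    m' :: prefMax rest m'

def stalins_sort_alt (arr : List Int) : List Int × List Int :=
  match arr with
  | [] => ([], [])   -- unreachable: arr[0] raises IndexError, excluded by Pre_
  | a :: _ =>
    let z := arr.zip (prefMax arr a)
    ((z.filter (fun p => p.1 == p.2)).map Prod.fst,
     (z.filter (fun p => p.1 != p.2)).map Prod.fst)

-- ===== PRECONDITION & SPEC =====
-- Pre_ excludes only the empty list, on which both Pythons raise IndexError at arr[0].
def Pre_stalins_sort (arr : List Int) : Prop := arr ≠ []
instance (arr : List Int) : Decidable (Pre_stalins_sort arr) := by unfold Pre_stalins_sort; infer_instance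
def pvWitness_stalins_sort : List Int := ([3, 1, 4, 1, 5])

def Spec_stalins_sort (arr : List Int) (out : List Int × List Int) : Prop := out = stalins_sort_alt arr
instance (arr : List Int) (out : List Int × List Int) : Decidable (Spec_stalins_sort arr out) := by unfold Spec_stalins_sort; infer_instance

-- ===== CLAIM (what is proved, stated in full; the proofs are below) =====
def Claim_equal_stalins_sort : Prop := ∀ (arr : List Int), Dom_stalins_sort arr → Pre_stalins_sort arr → Spec_stalins_sort arr (stalins_sort arr)

-- ===== LEMMAS AND PROOFS =====

-- A's loop, run with last-kept value m, produces exactly B's classification of the rest by prefMax m.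
lemma stalinsLoopA_eq (rest : List Int) : ∀ (m : Int) (s d : List Int), s.getLastD 0 = m →
    stalinsLoopA rest s d =
      (s ++ ((rest.zip (prefMax rest m)).filter (fun p => p.1 == p.2)).map Prod.fst,
       d ++ ((rest.zip (prefMax rest m)).filter (fun p => p.1 != p.2)).map Prod.fst) := by
  induction rest with
  | nil => intro m s d _; simp [stalinsLoopA, prefMax]
  | cons num rest ih =>
    intro m s d hs
    by_cases h : num ≥ m
    · have hm : (if m > num then m else num) = num := by omega
      rw [stalinsLoopA]
      rw [if_pos (by rw [hs]; exact h)]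
      rw [ih num (s ++ [num]) d (by simp)]
      simp [prefMax, hm, List.zip]
    · have hm : (if m > num then m else num) = m := by omega
      have hne : num ≠ m := by omega
      rw [stalinsLoopA]
      rw [if_neg (by rw [hs]; omega)]
      rw [ih m s (d ++ [num]) hs]
      simp [prefMax, hm, hne, List.zip]

-- ===== VERDICT (by name: the statement is the Claim_ definition above) =====
theorem stalins_sort_spec : Claim_equal_stalins_sort := by
  intro arr _ hpre
  unfold Spec_stalins_sort
  match arr with
  | [] => exact absurd rfl hpre
  | a :: rest =>
    rw [stalins_sort, stalins_sort_alt]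
    have hm : (if a > a then a else a) = a := by omega
    rw [stalinsLoopA_eq rest a [a] [] (by simp)]
    simp [prefMax, hm, List.zip]
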